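-- pv_equiv track=rewrite | github.com/djFatNerd/CityCraft | urban_planning/utils/image_process.py | get_buildings_boxes
-- ===== SOURCE A (Python) =====
-- def get_buildings_boxes(buildings):
--     building_boxes = []
--     qualified_buildings = []  # qualified buildings, buildings that has smallest edge > 5 meters
--     for building in buildings:
--         x_min = min(building, key=lambda x: x[0])[0]
--         x_max = max(building, key=lambda x: x[0])[0]
--         y_min = min(building, key=lambda x: x[1])[1]
--         y_max = max(building, key=lambda x: x[1])[1]
--
--         # Calculate height and width
--         h = x_max - x_min
--         w = y_max - y_min
--
--         building_box = (x_min, y_min, h, w)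
--         building_boxes.append(building_box)
--         qualified_buildings.append(building)  # Keep the building if it meets the condition
--
--     return qualified_buildings, building_boxes
-- ===== SOURCE B (Python) =====
-- def _box(building):
--     # single pass: track all four extremes at once, seeded from the first vertex
--     x0, y0 = building[0]
--     x_min = x_max = x0
--     y_min = y_max = y0
--     for x, y in building[1:]:
--         x_min = min(x_min, x)
--         x_max = max(x_max, x)
--         y_min = min(y_min, y)
--         y_max = max(y_max, y)
--     return (x_min, y_min, x_max - x_min, y_max - y_min)
--
--
-- def get_buildings_boxes(buildings):
--     boxes = [_box(b) for b in buildings]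
--     return list(buildings), boxes
-- ===== Notes on version B (the rewrite author's own statement) =====
-- stated objective: simpler
-- what changed: Replaced the four separate keyed min/max scans per building with one single-pass helper that tracks all four extremes simultaneously, and builds the result as a map instead of a pair of appended accumulators.
import Mathlib
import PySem

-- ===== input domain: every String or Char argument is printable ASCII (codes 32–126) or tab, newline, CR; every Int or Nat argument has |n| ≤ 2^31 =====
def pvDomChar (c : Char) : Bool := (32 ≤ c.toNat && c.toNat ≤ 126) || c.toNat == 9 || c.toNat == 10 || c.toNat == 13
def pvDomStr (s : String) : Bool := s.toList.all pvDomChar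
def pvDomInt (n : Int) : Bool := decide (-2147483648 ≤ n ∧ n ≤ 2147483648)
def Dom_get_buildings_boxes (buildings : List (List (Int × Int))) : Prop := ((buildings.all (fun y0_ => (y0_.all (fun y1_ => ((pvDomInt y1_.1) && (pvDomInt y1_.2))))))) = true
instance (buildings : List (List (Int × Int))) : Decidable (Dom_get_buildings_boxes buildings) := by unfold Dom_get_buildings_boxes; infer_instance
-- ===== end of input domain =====

-- B computes each building's bounding box in one single pass over the vertices
-- (tracking all four extremes together) instead of A's four separate keyed min/max scans: simpler.


-- ===== PORT A =====
def get_buildings_boxes (buildings : List (List (Int × Int))) : (List (List (Int × Int))) × (List (Int × Int × Int × Int)) :=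
  buildings.foldl (fun acc building =>
    -- min(building, key=lambda x: x[0])[0] etc.; .getD (0,0) is only reached when
    -- the building is empty, where Python's min raises (outside Pre_)
    let x_min := ((PySem.List.min? building (fun x => x.1)).getD (0, 0)).1
    let x_max := ((PySem.List.max? building (fun x => x.1)).getD (0, 0)).1
    let y_min := ((PySem.List.min? building (fun x => x.2)).getD (0, 0)).2
    let y_max := ((PySem.List.max? building (fun x => x.2)).getD (0, 0)).2
    let h := x_max - x_min
    let w := y_max - y_min
    (acc.1 ++ [building], acc.2 ++ [(x_min, y_min, h, w)]))
  ([], [])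

-- ===== PORT B =====
-- helper _box: single pass, four extremes tracked together; [] would be IndexError in Python (outside Pre_)
def pvBoxOf (building : List (Int × Int)) : Int × Int × Int × Int :=
  match building with
  | [] => (0, 0, 0, 0)
  | (x0, y0) :: rest =>
    let s := rest.foldl
      (fun s p => (min s.1 p.1, max s.2.1 p.1, min s.2.2.1 p.2, max s.2.2.2 p.2))
      (x0, x0, y0, y0)
    (s.1, s.2.2.1, s.2.1 - s.1, s.2.2.2 - s.2.2.1)

def get_buildings_boxes_alt (buildings : List (List (Int × Int))) : (List (List (Int × Int))) × (List (Int × Int × Int × Int)) :=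
  (buildings, buildings.map pvBoxOf)

-- ===== PRECONDITION & SPEC =====
-- Pre_ excludes buildings containing an empty polygon: there Python A raises ValueError (min of empty sequence)
-- and Python B raises IndexError (building[0]).
def Pre_get_buildings_boxes (buildings : List (List (Int × Int))) : Prop :=
  ∀ b ∈ buildings, b ≠ []
instance (buildings : List (List (Int × Int))) : Decidable (Pre_get_buildings_boxes buildings) := by unfold Pre_get_buildings_boxes; infer_instance

def pvWitness_get_buildings_boxes : (List (List (Int × Int))) := [[(0, 0), (3, 1)], [(2, 2)]]

def Spec_get_buildings_boxes (buildings : List (List (Int × Int))) (out : (List (List (Int × Int))) × (List (Int × Int × Int × Int))) : Prop := out = get_buildings_boxes_alt buildings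
instance (buildings : List (List (Int × Int))) (out : (List (List (Int × Int))) × (List (Int × Int × Int × Int))) : Decidable (Spec_get_buildings_boxes buildings out) := by unfold Spec_get_buildings_boxes; infer_instance

-- ===== CLAIM (what is proved, stated in full; the proofs are below) =====
def Claim_equal_get_buildings_boxes : Prop := ∀ (buildings : List (List (Int × Int))), Dom_get_buildings_boxes buildings → Pre_get_buildings_boxes buildings → Spec_get_buildings_boxes buildings (get_buildings_boxes buildings)

-- ===== LEMMAS AND PROOFS =====

-- the keyed min?/max? of a nonempty list equals the running min/max of the keys
theorem pv_key_min {α : Type} (key : α → Int) (d : α) (v : α) (t : List α) :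
    key ((PySem.List.min? (v :: t) key).getD d) = t.foldl (fun a x => min a (key x)) (key v) := by
  obtain ⟨m, hm⟩ : ∃ m, PySem.List.min? (v :: t) key = some m := by
    cases h : PySem.List.min? (v :: t) key with
    | none => exact absurd ((PySem.List.min?_eq_none_iff _ _).mp h) (by simp)
    | some m => exact ⟨m, rfl⟩
  rw [hm, Option.getD_some]
  have hmem := PySem.List.min?_mem hm
  have hmin := PySem.List.min?_isMin hm
  rw [← List.foldl_map]
  have h1 := PySem.List.foldl_min_le (t.map key) (key v)
  have h2 := PySem.List.foldl_min_mem (t.map key) (key v)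
  refine le_antisymm ?_ ?_
  · rcases h2 with h2 | h2
    · rw [h2]; exact hmin v (List.mem_cons_self ..)
    · obtain ⟨x, hx, hxe⟩ := List.mem_map.mp h2
      rw [← hxe]; exact hmin x (List.mem_cons_of_mem _ hx)
  · rcases List.mem_cons.mp hmem with h | h
    · rw [h]; exact h1.1
    · exact h1.2 (key m) (List.mem_map.mpr ⟨m, h, rfl⟩)

theorem pv_key_max {α : Type} (key : α → Int) (d : α) (v : α) (t : List α) :
    key ((PySem.List.max? (v :: t) key).getD d) = t.foldl (fun a x => max a (key x)) (key v) := by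
  obtain ⟨m, hm⟩ : ∃ m, PySem.List.max? (v :: t) key = some m := by
    cases h : PySem.List.max? (v :: t) key with
    | none => exact absurd ((PySem.List.max?_eq_none_iff _ _).mp h) (by simp)
    | some m => exact ⟨m, rfl⟩
  rw [hm, Option.getD_some]
  have hmem := PySem.List.max?_mem hm
  have hmax := PySem.List.max?_isMax hm
  rw [← List.foldl_map]
  have h1 := PySem.List.le_foldl_max (t.map key) (key v)
  have h2 := PySem.List.foldl_max_mem (t.map key) (key v)
  refine le_antisymm ?_ ?_
  · rcases List.mem_cons.mp hmem with h | h
    · rw [h]; exact h1.1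
    · exact h1.2 (key m) (List.mem_map.mpr ⟨m, h, rfl⟩)
  · rcases h2 with h2 | h2
    · rw [h2]; exact hmax v (List.mem_cons_self ..)
    · obtain ⟨x, hx, hxe⟩ := List.mem_map.mp h2
      rw [← hxe]; exact hmax x (List.mem_cons_of_mem _ hx)

-- B's 4-tuple fold splits into four independent folds
theorem pv_tuple_fold (t : List (Int × Int)) (a b c d : Int) :
    t.foldl (fun s p => (min s.1 p.1, max s.2.1 p.1, min s.2.2.1 p.2, max s.2.2.2 p.2)) (a, b, c, d)
      = (t.foldl (fun v p => min v p.1) a,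
         t.foldl (fun v p => max v p.1) b,
         t.foldl (fun v p => min v p.2) c,
         t.foldl (fun v p => max v p.2) d) := by
  induction t generalizing a b c d with
  | nil => rfl
  | cons x t ih => simp only [List.foldl_cons]; exact ih _ _ _ _

-- per nonempty building, A's four scans produce exactly B's single-pass box
theorem pv_box_eq (b : List (Int × Int)) (hb : b ≠ []) :
    (((PySem.List.min? b (fun x => x.1)).getD (0, 0)).1,
     ((PySem.List.min? b (fun x => x.2)).getD (0, 0)).2,
     ((PySem.List.max? b (fun x => x.1)).getD (0, 0)).1 - ((PySem.List.min? b (fun x => x.1)).getD (0, 0)).1,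
     ((PySem.List.max? b (fun x => x.2)).getD (0, 0)).2 - ((PySem.List.min? b (fun x => x.2)).getD (0, 0)).2)
      = pvBoxOf b := by
  match b with
  | [] => exact absurd rfl hb
  | (x0, y0) :: t =>
    simp only [pvBoxOf, pv_tuple_fold]
    have h1 := pv_key_min (fun x : Int × Int => x.1) ((0, 0) : Int × Int) (x0, y0) t
    have h2 := pv_key_min (fun x : Int × Int => x.2) ((0, 0) : Int × Int) (x0, y0) t
    have h3 := pv_key_max (fun x : Int × Int => x.1) ((0, 0) : Int × Int) (x0, y0) t
    have h4 := pv_key_max (fun x : Int × Int => x.2) ((0, 0) : Int × Int) (x0, y0) t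
    simp only at h1 h2 h3 h4 ⊢
    rw [h1, h2, h3, h4]

-- A's accumulator fold, from any starting accumulator
theorem pv_A_fold (bs : List (List (Int × Int))) (q : List (List (Int × Int)))
    (bx : List (Int × Int × Int × Int)) (h : ∀ b ∈ bs, b ≠ []) :
    bs.foldl (fun acc building =>
      let x_min := ((PySem.List.min? building (fun x => x.1)).getD (0, 0)).1
      let x_max := ((PySem.List.max? building (fun x => x.1)).getD (0, 0)).1
      let y_min := ((PySem.List.min? building (fun x => x.2)).getD (0, 0)).2
      let y_max := ((PySem.List.max? building (fun x => x.2)).getD (0, 0)).2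
      let hh := x_max - x_min
      let w := y_max - y_min
      (acc.1 ++ [building], acc.2 ++ [(x_min, y_min, hh, w)])) (q, bx)
      = (q ++ bs, bx ++ bs.map pvBoxOf) := by
  induction bs generalizing q bx with
  | nil => simp
  | cons b bs ih =>
    simp only [List.foldl_cons]
    rw [ih _ _ (fun x hx => h x (List.mem_cons_of_mem _ hx))]
    rw [pv_box_eq b (h b (List.mem_cons_self ..))]
    simp

-- ===== VERDICT (by name: the statement is the Claim_ definition above) =====
theorem get_buildings_boxes_spec : Claim_equal_get_buildings_boxes := by
  intro buildings _ hpre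
  unfold Spec_get_buildings_boxes get_buildings_boxes get_buildings_boxes_alt
  rw [pv_A_fold buildings [] [] hpre]
  simp
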